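-- pv_equiv track=rewrite | github.com/debashishroy00/wpa | backend/app/api/v1/endpoints/financial.py | classify_asset_for_portfolio
-- ===== SOURCE A (Python) =====
-- def classify_asset_for_portfolio(description: str, subcategory: str = None) -> str:
--     """
--     Classify assets specifically for portfolio analysis by asset class.
--     This is different from categorize_financial_entry which groups by account type.
--
--     Asset Classes for Portfolio Analysis:
--     - stocks: Equities, ETFs, individual stocks
--     - bonds: Fixed income, bonds, bond funds
--     - real_estate: Real estate, REITs, property
--     - cash: Cash equivalents, savings, checking
--     - alternative: Crypto, commodities, private equity
--     - retirement: Mixed retirement accounts (to be broken down further)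
--     """
--     description_lower = description.lower()
--
--     # Real Estate (including REITs)
--     if any(keyword in description_lower for keyword in [
--         'home', 'house', 'property', 'real estate', 'residence', 'rental',
--         'mortgage', 'reit', 'real estate investment trust'
--     ]):
--         return "real_estate"
--
--     # Alternative Investments (Crypto, Commodities, etc.)
--     elif any(keyword in description_lower for keyword in [
--         'bitcoin', 'crypto', 'btc', 'eth', 'ethereum', 'dogecoin', 'cryptocurrency',
--         'gold', 'silver', 'commodity', 'precious metals', 'hedge fund', 'private equity'
--     ]):
--         return "alternative"
--
--     # Cash & Cash Equivalents
--     elif any(keyword in description_lower for keyword in [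
--         'checking', 'savings', 'money market', 'cd', 'certificate of deposit',
--         'cash', 'offshore', 'high yield savings'
--     ]) and not any(keyword in description_lower for keyword in ['mutual', 'fund', 'etf', 'stock', 'investment', 'bond']):
--         return "cash"
--
--     # Bonds & Fixed Income
--     elif any(keyword in description_lower for keyword in [
--         'bond', 'treasury', 'fixed income', 'government bond', 'corporate bond',
--         'municipal bond', 'bond fund', 'bnd', 'agg', 'fixed', 'pacific life'
--     ]):
--         return "bonds"
--
--     # Stocks & Equities (including brokerages and equity funds)
--     elif any(keyword in description_lower for keyword in [
--         'stock', 'equity', 'etf', 'mutual fund', 'brokerage', 'investment',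
--         'portfolio', 'securities', 'etrade', 'robinhood', 'vanguard', 'fidelity',
--         'spy', 'voo', 'qqq', 'growth', 'value', 'international', 'emerging',
--         'index fund', 'total stock'
--     ]):
--         return "stocks"
--
--     # Retirement Accounts (mixed - need further breakdown)
--     elif any(keyword in description_lower for keyword in [
--         '401k', '401(k)', 'ira', 'roth', 'retirement', 'pension', 'sep',
--         '403b', 'tsp', '529', 'hsa', 'health savings'
--     ]):
--         return "retirement"
--
--     # Default to other if can't classify
--     else:
--         return "other"
-- ===== SOURCE B (Python) =====
-- # Different algorithm: instead of testing each category's keywords against the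
-- # string with `in`, scan the lowered string ONCE over all start positions,
-- # collecting the tags of every keyword that begins there (keywords bucketed by
-- # first character in a flat keyword->tags table), then resolve the
-- # cash-exclusion tag and pick the highest-priority matched class.
--
-- KEYWORD_TAGS = {
--     # real estate
--     'home': ('real_estate',), 'house': ('real_estate',), 'property': ('real_estate',),
--     'real estate': ('real_estate',), 'residence': ('real_estate',), 'rental': ('real_estate',),
--     'mortgage': ('real_estate',), 'reit': ('real_estate',),
--     'real estate investment trust': ('real_estate',),
--     # alternative
--     'bitcoin': ('alternative',), 'crypto': ('alternative',), 'btc': ('alternative',),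
--     'eth': ('alternative',), 'ethereum': ('alternative',), 'dogecoin': ('alternative',),
--     'cryptocurrency': ('alternative',), 'gold': ('alternative',), 'silver': ('alternative',),
--     'commodity': ('alternative',), 'precious metals': ('alternative',),
--     'hedge fund': ('alternative',), 'private equity': ('alternative',),
--     # cash includes
--     'checking': ('cash',), 'savings': ('cash',), 'money market': ('cash',), 'cd': ('cash',),
--     'certificate of deposit': ('cash',), 'cash': ('cash',), 'offshore': ('cash',),
--     'high yield savings': ('cash',),
--     # cash excludes (tag 'no_cash'), some double as bond/stock keywords
--     'mutual': ('no_cash',), 'fund': ('no_cash',), 'etf': ('no_cash', 'stocks'),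
--     'stock': ('no_cash', 'stocks'), 'investment': ('no_cash', 'stocks'),
--     'bond': ('no_cash', 'bonds'),
--     # bonds
--     'treasury': ('bonds',), 'fixed income': ('bonds',), 'government bond': ('bonds',),
--     'corporate bond': ('bonds',), 'municipal bond': ('bonds',), 'bond fund': ('bonds',),
--     'bnd': ('bonds',), 'agg': ('bonds',), 'fixed': ('bonds',), 'pacific life': ('bonds',),
--     # stocks
--     'equity': ('stocks',), 'mutual fund': ('stocks',), 'brokerage': ('stocks',),
--     'portfolio': ('stocks',), 'securities': ('stocks',), 'etrade': ('stocks',),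
--     'robinhood': ('stocks',), 'vanguard': ('stocks',), 'fidelity': ('stocks',),
--     'spy': ('stocks',), 'voo': ('stocks',), 'qqq': ('stocks',), 'growth': ('stocks',),
--     'value': ('stocks',), 'international': ('stocks',), 'emerging': ('stocks',),
--     'index fund': ('stocks',), 'total stock': ('stocks',),
--     # retirement
--     '401k': ('retirement',), '401(k)': ('retirement',), 'ira': ('retirement',),
--     'roth': ('retirement',), 'retirement': ('retirement',), 'pension': ('retirement',),
--     'sep': ('retirement',), '403b': ('retirement',), 'tsp': ('retirement',),
--     '529': ('retirement',), 'hsa': ('retirement',), 'health savings': ('retirement',),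
-- }
--
-- PRIORITY = ['real_estate', 'alternative', 'cash', 'bonds', 'stocks', 'retirement']
--
-- # keywords bucketed by their first character, so a scan position only tests
-- # the keywords that could start there
-- INDEX = {}
-- for _kw, _tags in KEYWORD_TAGS.items():
--     INDEX.setdefault(_kw[0], []).append((_kw, _tags))
--
--
-- def classify_asset_for_portfolio(description: str, subcategory: str = None) -> str:
--     d = description.lower()
--     found = set()
--     for i, c in enumerate(d):
--         for kw, tags in INDEX.get(c, ()):
--             if d.startswith(kw, i):
--                 found.update(tags)
--     if 'no_cash' in found:
--         found.discard('cash')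
--     for cls in PRIORITY:
--         if cls in found:
--             return cls
--     return 'other'
-- ===== Notes on version B (the rewrite author's own statement) =====
-- stated objective: alternative
-- what changed: Instead of testing each category's keyword list against the string with per-category substring searches, B scans the lowered string once over all start positions, collecting into a set the tags of every keyword that begins there (keywords bucketed by first character in one flat keyword-to-tags table), then resolves the cash-exclusion tag and returns the highest-priority matched class.
import Mathlib
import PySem

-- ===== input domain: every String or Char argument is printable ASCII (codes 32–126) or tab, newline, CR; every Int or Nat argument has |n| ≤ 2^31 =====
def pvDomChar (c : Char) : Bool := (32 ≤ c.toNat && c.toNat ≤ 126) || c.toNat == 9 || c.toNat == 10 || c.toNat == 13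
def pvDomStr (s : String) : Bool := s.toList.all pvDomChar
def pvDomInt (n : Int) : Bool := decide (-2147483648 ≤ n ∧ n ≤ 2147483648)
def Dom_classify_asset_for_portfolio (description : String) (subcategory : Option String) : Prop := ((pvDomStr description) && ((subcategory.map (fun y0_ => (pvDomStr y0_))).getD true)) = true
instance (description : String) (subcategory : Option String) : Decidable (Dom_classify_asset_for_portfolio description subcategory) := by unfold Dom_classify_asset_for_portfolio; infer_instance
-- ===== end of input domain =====

-- B replaces A's per-category keyword search by a single scan over all start positions of the
-- lowered string, collecting the matched keywords' tags via a flat keyword->tags table and then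
-- resolving the cash-exclusion tag and picking the highest-priority matched class (objective: alternative).


-- ===== PORT A =====
def classify_asset_for_portfolio (description : String) (subcategory : Option String) : String :=
  let description_lower := PySem.Str.lower description
  if ["home", "house", "property", "real estate", "residence", "rental",
      "mortgage", "reit", "real estate investment trust"].any
      (fun keyword => PySem.Str.isIn keyword description_lower) then
    "real_estate"
  else if ["bitcoin", "crypto", "btc", "eth", "ethereum", "dogecoin", "cryptocurrency",
      "gold", "silver", "commodity", "precious metals", "hedge fund", "private equity"].any
      (fun keyword => PySem.Str.isIn keyword description_lower) then
    "alternative"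
  else if (["checking", "savings", "money market", "cd", "certificate of deposit",
      "cash", "offshore", "high yield savings"].any
      (fun keyword => PySem.Str.isIn keyword description_lower)
      && !(["mutual", "fund", "etf", "stock", "investment", "bond"].any
      (fun keyword => PySem.Str.isIn keyword description_lower))) then
    "cash"
  else if ["bond", "treasury", "fixed income", "government bond", "corporate bond",
      "municipal bond", "bond fund", "bnd", "agg", "fixed", "pacific life"].any
      (fun keyword => PySem.Str.isIn keyword description_lower) then
    "bonds"
  else if ["stock", "equity", "etf", "mutual fund", "brokerage", "investment",
      "portfolio", "securities", "etrade", "robinhood", "vanguard", "fidelity",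
      "spy", "voo", "qqq", "growth", "value", "international", "emerging",
      "index fund", "total stock"].any
      (fun keyword => PySem.Str.isIn keyword description_lower) then
    "stocks"
  else if ["401k", "401(k)", "ira", "roth", "retirement", "pension", "sep",
      "403b", "tsp", "529", "hsa", "health savings"].any
      (fun keyword => PySem.Str.isIn keyword description_lower) then
    "retirement"
  else
    "other"

-- ===== PORT B =====
-- Source B's flat KEYWORD_TAGS dict, in insertion order (its iteration order feeds only a set, so order is immaterial)
def pvKeywordTags : List (String × List String) :=
  [("home", ["real_estate"]), ("house", ["real_estate"]), ("property", ["real_estate"]),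
   ("real estate", ["real_estate"]), ("residence", ["real_estate"]), ("rental", ["real_estate"]),
   ("mortgage", ["real_estate"]), ("reit", ["real_estate"]),
   ("real estate investment trust", ["real_estate"]),
   ("bitcoin", ["alternative"]), ("crypto", ["alternative"]), ("btc", ["alternative"]),
   ("eth", ["alternative"]), ("ethereum", ["alternative"]), ("dogecoin", ["alternative"]),
   ("cryptocurrency", ["alternative"]), ("gold", ["alternative"]), ("silver", ["alternative"]),
   ("commodity", ["alternative"]), ("precious metals", ["alternative"]),
   ("hedge fund", ["alternative"]), ("private equity", ["alternative"]),
   ("checking", ["cash"]), ("savings", ["cash"]), ("money market", ["cash"]), ("cd", ["cash"]),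
   ("certificate of deposit", ["cash"]), ("cash", ["cash"]), ("offshore", ["cash"]),
   ("high yield savings", ["cash"]),
   ("mutual", ["no_cash"]), ("fund", ["no_cash"]), ("etf", ["no_cash", "stocks"]),
   ("stock", ["no_cash", "stocks"]), ("investment", ["no_cash", "stocks"]),
   ("bond", ["no_cash", "bonds"]),
   ("treasury", ["bonds"]), ("fixed income", ["bonds"]), ("government bond", ["bonds"]),
   ("corporate bond", ["bonds"]), ("municipal bond", ["bonds"]), ("bond fund", ["bonds"]),
   ("bnd", ["bonds"]), ("agg", ["bonds"]), ("fixed", ["bonds"]), ("pacific life", ["bonds"]),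
   ("equity", ["stocks"]), ("mutual fund", ["stocks"]), ("brokerage", ["stocks"]),
   ("portfolio", ["stocks"]), ("securities", ["stocks"]), ("etrade", ["stocks"]),
   ("robinhood", ["stocks"]), ("vanguard", ["stocks"]), ("fidelity", ["stocks"]),
   ("spy", ["stocks"]), ("voo", ["stocks"]), ("qqq", ["stocks"]), ("growth", ["stocks"]),
   ("value", ["stocks"]), ("international", ["stocks"]), ("emerging", ["stocks"]),
   ("index fund", ["stocks"]), ("total stock", ["stocks"]),
   ("401k", ["retirement"]), ("401(k)", ["retirement"]), ("ira", ["retirement"]),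
   ("roth", ["retirement"]), ("retirement", ["retirement"]), ("pension", ["retirement"]),
   ("sep", ["retirement"]), ("403b", ["retirement"]), ("tsp", ["retirement"]),
   ("529", ["retirement"]), ("hsa", ["retirement"]), ("health savings", ["retirement"])]

def pvPriority : List String :=
  ["real_estate", "alternative", "cash", "bonds", "stocks", "retirement"]

-- _kw[0]: every KEYWORD_TAGS key is nonempty, so s[0] never raises; ported totally (exact on nonempty keys)
def pvFirst (s : String) : Char := (PySem.Str.pyGet? s 0).getD ' '

-- Source B's INDEX build loop: keywords bucketed by first character (setdefault+append = getD ++ [p], insert)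
def pvIndex : PySem.Dict Char (List (String × List String)) :=
  pvKeywordTags.foldl
    (fun ix p => PySem.Dict.insert ix (pvFirst p.1) (PySem.Dict.getD ix (pvFirst p.1) [] ++ [p]))
    PySem.Dict.empty

-- the set of tags matched somewhere in d (Source B's double for-loop over enumerate(d) and the bucket);
-- d.startswith(kw, i) is ported as: kw is a prefix of the slice d[i:] (exact for the 0 ≤ i enumerate yields)
def pvFound (d : String) : PySem.Set String :=
  (PySem.List.enumerate d.toList).foldl
    (fun found ic =>
      (PySem.Dict.getD pvIndex ic.2 []).foldl
        (fun acc p =>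
          if PySem.Str.startswith (PySem.Str.slice d (some ic.1) none) p.1 then
            PySem.Set.update acc p.2
          else acc)
        found)
    PySem.Set.empty

-- Source B's final priority loop: first class of pvPriority present in found, else "other"
def pvPick (found : PySem.Set String) : List String → String
  | [] => "other"
  | c :: rest => if PySem.Set.contains found c then c else pvPick found rest

def classify_asset_for_portfolio_alt (description : String) (subcategory : Option String) : String :=
  let found := pvFound (PySem.Str.lower description)
  let found := if PySem.Set.contains found "no_cash" then PySem.Set.discard found "cash" else found
  pvPick found pvPriority

-- ===== PRECONDITION & SPEC =====
def Spec_classify_asset_for_portfolio (description : String) (subcategory : Option String) (out : String) : Prop := out = classify_asset_for_portfolio_alt description subcategory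
instance (description : String) (subcategory : Option String) (out : String) : Decidable (Spec_classify_asset_for_portfolio description subcategory out) := by unfold Spec_classify_asset_for_portfolio; infer_instance

-- ===== CLAIM (what is proved, stated in full; the proofs are below) =====
def Claim_equal_classify_asset_for_portfolio : Prop := ∀ (description : String) (subcategory : Option String), Dom_classify_asset_for_portfolio description subcategory → Spec_classify_asset_for_portfolio description subcategory (classify_asset_for_portfolio description subcategory)

-- ===== LEMMAS AND PROOFS =====

-- membership in the inner fold over the table
theorem pv_mem_inner_foldl (x : String) (l : List (String × List String)) (acc : PySem.Set String)
    (cond : String → Bool) :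
    x ∈ l.foldl (fun a p => if cond p.1 then PySem.Set.update a p.2 else a) acc ↔
      x ∈ acc ∨ ∃ p ∈ l, cond p.1 = true ∧ x ∈ p.2 := by
  induction l generalizing acc with
  | nil => simp
  | cons hd tl ih =>
    simp only [List.foldl_cons, List.mem_cons]
    rw [ih]
    by_cases h : cond hd.1 = true
    · simp only [h, if_true]
      rw [PySem.Set.mem_update]
      constructor
      · rintro ((hx | hx2) | ⟨p, hp, hc, hm⟩)
        · exact Or.inl hx
        · exact Or.inr ⟨hd, Or.inl rfl, h, hx2⟩
        · exact Or.inr ⟨p, Or.inr hp, hc, hm⟩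
      · rintro (hx | ⟨p, hp | hp, hc, hm⟩)
        · exact Or.inl (Or.inl hx)
        · subst hp; exact Or.inl (Or.inr hm)
        · exact Or.inr ⟨p, hp, hc, hm⟩
    · simp [h]

-- membership in the outer fold over the enumerated positions
theorem pv_mem_outer_foldl (x : String) (li : List (Int × Char)) (init : PySem.Set String)
    (bucket : Char → List (String × List String)) (cond : Int → String → Bool) :
    x ∈ li.foldl
        (fun found ic =>
          (bucket ic.2).foldl
            (fun acc p => if cond ic.1 p.1 then PySem.Set.update acc p.2 else acc) found)
        init ↔
      x ∈ init ∨ ∃ ic ∈ li, ∃ p ∈ bucket ic.2, cond ic.1 p.1 = true ∧ x ∈ p.2 := by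
  induction li generalizing init with
  | nil => simp
  | cons hd tl ih =>
    simp only [List.foldl_cons, List.mem_cons]
    rw [ih, pv_mem_inner_foldl]
    constructor
    · rintro ((hx | ⟨p, hp, hc, hm⟩) | ⟨i, hi, hrest⟩)
      · exact Or.inl hx
      · exact Or.inr ⟨hd, Or.inl rfl, p, hp, hc, hm⟩
      · exact Or.inr ⟨i, Or.inr hi, hrest⟩
    · rintro (hx | ⟨i, hi | hi, hrest⟩)
      · exact Or.inl (Or.inl hx)
      · subst hi; exact Or.inl (Or.inr hrest)
      · exact Or.inr ⟨i, hi, hrest⟩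

-- membership in a bucket of a dict built by the setdefault/append loop
theorem pv_mem_build (l : List (String × List String))
    (ix0 : PySem.Dict Char (List (String × List String)))
    (f : String × List String → Char) (c : Char) (q : String × List String) :
    q ∈ PySem.Dict.getD
        (l.foldl (fun ix p => PySem.Dict.insert ix (f p) (PySem.Dict.getD ix (f p) [] ++ [p])) ix0)
        c [] ↔
      q ∈ PySem.Dict.getD ix0 c [] ∨ (q ∈ l ∧ f q = c) := by
  induction l generalizing ix0 with
  | nil => simp
  | cons hd tl ih =>
    simp only [List.foldl_cons, List.mem_cons]
    rw [ih, PySem.Dict.getD_insert]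
    by_cases hc : c = f hd
    · rw [if_pos hc]
      constructor
      · rintro (h | ⟨hq, hf⟩)
        · rcases List.mem_append.mp h with h | h
          · exact Or.inl (hc ▸ h)
          · rcases List.mem_singleton.mp h with rfl
            exact Or.inr ⟨Or.inl rfl, hc.symm⟩
        · exact Or.inr ⟨Or.inr hq, hf⟩
      · rintro (h | ⟨rfl | hq, hf⟩)
        · exact Or.inl (List.mem_append.mpr (Or.inl (hc ▸ h)))
        · exact Or.inl (List.mem_append.mpr (Or.inr (List.mem_singleton.mpr rfl)))
        · exact Or.inr ⟨hq, hf⟩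
    · rw [if_neg hc]
      constructor
      · rintro (h | ⟨hq, hf⟩)
        · exact Or.inl h
        · exact Or.inr ⟨Or.inr hq, hf⟩
      · rintro (h | ⟨rfl | hq, hf⟩)
        · exact Or.inl h
        · exact absurd hf.symm hc
        · exact Or.inr ⟨hq, hf⟩

-- membership in pvIndex's buckets
theorem pv_mem_bucket (c : Char) (q : String × List String) :
    q ∈ PySem.Dict.getD pvIndex c [] ↔ q ∈ pvKeywordTags ∧ pvFirst q.1 = c := by
  unfold pvIndex
  rw [pv_mem_build pvKeywordTags PySem.Dict.empty (fun p => pvFirst p.1) c q]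
  simp [PySem.Dict.getD_empty]

-- membership in enumerate
theorem pv_mem_enumerate {α : Type} (xs : List α) (s i : Int) (a : α) :
    (i, a) ∈ PySem.List.enumerate xs s ↔
      s ≤ i ∧ i < s + xs.length ∧ xs[(i - s).toNat]? = some a := by
  induction xs generalizing s with
  | nil =>
    simp only [PySem.List.enumerate_nil, List.not_mem_nil, List.length_nil, false_iff]
    rintro ⟨h1, h2, -⟩
    omega
  | cons hd tl ih =>
    rw [PySem.List.enumerate_cons, List.mem_cons, ih (s + 1)]
    constructor
    · rintro (h | ⟨h1, h2, h3⟩)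
      · injection h with h1 h2
        subst h1; subst h2
        refine ⟨le_refl _, by simp only [List.length_cons]; push_cast; omega, by simp⟩
      · refine ⟨by omega, by simp at h2 ⊢; omega, ?_⟩
        have ht : (i - s).toNat = (i - (s + 1)).toNat + 1 := by omega
        rw [ht]
        simpa using h3
    · rintro ⟨h1, h2, h3⟩
      by_cases hi : i = s
      · subst hi
        simp only [sub_self, Int.toNat_zero, List.getElem?_cons_zero, Option.some.injEq] at h3
        exact Or.inl (by rw [h3])
      · refine Or.inr ⟨by omega, by simp at h2 ⊢; omega, ?_⟩
        have ht : (i - s).toNat = (i - (s + 1)).toNat + 1 := by omega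
        rw [ht] at h3
        simpa using h3

-- a keyword of the table matches at some scanned position iff it is a substring
theorem pv_match_iff (d : String) (p : String × List String) (hp : p ∈ pvKeywordTags) :
    (∃ ic ∈ PySem.List.enumerate d.toList,
        p ∈ PySem.Dict.getD pvIndex ic.2 [] ∧
        PySem.Str.startswith (PySem.Str.slice d (some ic.1) none) p.1 = true) ↔
      PySem.Str.isIn p.1 d = true := by
  have hk : p.1.toList ≠ [] := (by decide : ∀ q ∈ pvKeywordTags, q.1.toList ≠ []) p hp
  rw [show PySem.Str.isIn p.1 d = PySem.Chars.isIn p.1.toList d.toList from by simp,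
    ← PySem.Chars.exists_prefix_drop_iff_isIn p.1.toList d.toList]
  constructor
  · rintro ⟨⟨i, c⟩, hic, -, hs⟩
    rw [pv_mem_enumerate] at hic
    refine ⟨i.toNat, ?_⟩
    have := (PySem.Chars.startswith_iff _ _).mp (by simpa using hs)
    rwa [PySem.List.slice_from _ hic.1] at this
  · rintro ⟨j, hj⟩
    by_cases hjlen : j < d.toList.length
    · obtain ⟨t, ht⟩ := hj
      cases hk0 : p.1.toList with
      | nil => exact absurd hk0 hk
      | cons c0 k' =>
        rw [hk0] at ht
        have hchar : d.toList[j]? = some c0 := by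
          rw [← List.head?_drop, ← ht]
          rfl
        refine ⟨((j : Int), c0), ?_, ?_, ?_⟩
        · rw [pv_mem_enumerate]
          refine ⟨Int.natCast_nonneg j, by omega, ?_⟩
          simpa using hchar
        · rw [pv_mem_bucket]
          refine ⟨hp, ?_⟩
          have hpg : PySem.List.pyGet? p.1.toList 0 = some c0 := by
            rw [hk0]; simp [pysem]
          simp [pvFirst, hpg]
        · have heq : PySem.Str.startswith (PySem.Str.slice d (some (j : Int)) none) p.1 =
              PySem.Chars.startswith (PySem.List.slice d.toList (some (j : Int)) none) p.1.toList := by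
            simp
          rw [heq, PySem.List.slice_from _ (Int.natCast_nonneg j)]
          apply (PySem.Chars.startswith_iff _ _).mpr
          simp only [Int.toNat_natCast]
          exact ⟨t, by rw [hk0]; exact ht⟩
    · exfalso
      have hdz : d.toList.drop j = [] := List.drop_eq_nil_of_le (by omega)
      rw [hdz] at hj
      exact hk (List.prefix_nil.mp hj)

-- a nonempty keyword matches at some scanned position iff it is a substring
-- membership in pvFound characterised by substring tests
theorem pv_mem_found_iff (x : String) (d : String) :
    x ∈ pvFound d ↔ ∃ p ∈ pvKeywordTags, PySem.Str.isIn p.1 d = true ∧ x ∈ p.2 := by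
  unfold pvFound
  rw [pv_mem_outer_foldl x _ _ (fun c => PySem.Dict.getD pvIndex c [])
    (fun i kw => PySem.Str.startswith (PySem.Str.slice d (some i) none) kw)]
  simp only [PySem.Set.empty, List.not_mem_nil, false_or]
  constructor
  · rintro ⟨ic, hic, p, hb, hc, hm⟩
    have hp : p ∈ pvKeywordTags := ((pv_mem_bucket ic.2 p).mp hb).1
    exact ⟨p, hp, (pv_match_iff d p hp).mp ⟨ic, hic, hb, hc⟩, hm⟩
  · rintro ⟨p, hp, hin, hm⟩
    obtain ⟨ic, hic, hb, hc⟩ := (pv_match_iff d p hp).mpr hin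
    exact ⟨ic, hic, p, hb, hc, hm⟩

-- pvFound membership for a fixed tag as an existential over the tag's key list
theorem pv_found_tag (t : String) (d : String) :
    (t ∈ pvFound d) ↔
      ∃ kw ∈ (pvKeywordTags.filter (fun p => decide (t ∈ p.2))).map Prod.fst,
        PySem.Str.isIn kw d = true := by
  rw [pv_mem_found_iff]
  simp only [List.mem_map, List.mem_filter, decide_eq_true_eq]
  constructor
  · rintro ⟨p, hp, hin, hm⟩
    exact ⟨p.1, ⟨p, ⟨hp, hm⟩, rfl⟩, hin⟩
  · rintro ⟨kw, ⟨p, ⟨hp, hm⟩, rfl⟩, hin⟩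
    exact ⟨p, hp, hin, hm⟩

-- an existential over a list only depends on the list's members
theorem pv_exists_mem_congr {P : String → Prop} (L1 L2 : List String)
    (h12 : ∀ x ∈ L1, x ∈ L2) (h21 : ∀ x ∈ L2, x ∈ L1) :
    (∃ kw ∈ L1, P kw) ↔ (∃ kw ∈ L2, P kw) := by
  constructor
  · rintro ⟨kw, hm, hp⟩; exact ⟨kw, h12 kw hm, hp⟩
  · rintro ⟨kw, hm, hp⟩; exact ⟨kw, h21 kw hm, hp⟩

-- per-tag characterisations: membership in pvFound d equals A's any-keyword test
theorem pv_found_real_estate (d : String) :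
    ("real_estate" ∈ pvFound d) ↔
      (["home", "house", "property", "real estate", "residence", "rental",
        "mortgage", "reit", "real estate investment trust"].any
        (fun keyword => PySem.Str.isIn keyword d) = true) := by
  rw [pv_found_tag, List.any_eq_true]
  exact pv_exists_mem_congr _ _ (by decide) (by decide)

theorem pv_found_alternative (d : String) :
    ("alternative" ∈ pvFound d) ↔
      (["bitcoin", "crypto", "btc", "eth", "ethereum", "dogecoin", "cryptocurrency",
        "gold", "silver", "commodity", "precious metals", "hedge fund", "private equity"].any
        (fun keyword => PySem.Str.isIn keyword d) = true) := by
  rw [pv_found_tag, List.any_eq_true]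
  exact pv_exists_mem_congr _ _ (by decide) (by decide)

theorem pv_found_cash (d : String) :
    ("cash" ∈ pvFound d) ↔
      (["checking", "savings", "money market", "cd", "certificate of deposit",
        "cash", "offshore", "high yield savings"].any
        (fun keyword => PySem.Str.isIn keyword d) = true) := by
  rw [pv_found_tag, List.any_eq_true]
  exact pv_exists_mem_congr _ _ (by decide) (by decide)

theorem pv_found_no_cash (d : String) :
    ("no_cash" ∈ pvFound d) ↔
      (["mutual", "fund", "etf", "stock", "investment", "bond"].any
        (fun keyword => PySem.Str.isIn keyword d) = true) := by
  rw [pv_found_tag, List.any_eq_true]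
  exact pv_exists_mem_congr _ _ (by decide) (by decide)

theorem pv_found_bonds (d : String) :
    ("bonds" ∈ pvFound d) ↔
      (["bond", "treasury", "fixed income", "government bond", "corporate bond",
        "municipal bond", "bond fund", "bnd", "agg", "fixed", "pacific life"].any
        (fun keyword => PySem.Str.isIn keyword d) = true) := by
  rw [pv_found_tag, List.any_eq_true]
  exact pv_exists_mem_congr _ _ (by decide) (by decide)

theorem pv_found_stocks (d : String) :
    ("stocks" ∈ pvFound d) ↔
      (["stock", "equity", "etf", "mutual fund", "brokerage", "investment",
        "portfolio", "securities", "etrade", "robinhood", "vanguard", "fidelity",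
        "spy", "voo", "qqq", "growth", "value", "international", "emerging",
        "index fund", "total stock"].any
        (fun keyword => PySem.Str.isIn keyword d) = true) := by
  rw [pv_found_tag, List.any_eq_true]
  exact pv_exists_mem_congr _ _ (by decide) (by decide)

theorem pv_found_retirement (d : String) :
    ("retirement" ∈ pvFound d) ↔
      (["401k", "401(k)", "ira", "roth", "retirement", "pension", "sep",
        "403b", "tsp", "529", "hsa", "health savings"].any
        (fun keyword => PySem.Str.isIn keyword d) = true) := by
  rw [pv_found_tag, List.any_eq_true]
  exact pv_exists_mem_congr _ _ (by decide) (by decide)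

-- ===== VERDICT (by name: the statement is the Claim_ definition above) =====
theorem classify_asset_for_portfolio_spec : Claim_equal_classify_asset_for_portfolio := by
  intro description subcategory _
  unfold Spec_classify_asset_for_portfolio classify_asset_for_portfolio
    classify_asset_for_portfolio_alt
  simp only [pvPriority, pvPick]
  set d := PySem.Str.lower description with hd
  set F := pvFound d with hF
  have eRE : PySem.Set.contains F "real_estate" =
      (["home", "house", "property", "real estate", "residence", "rental",
        "mortgage", "reit", "real estate investment trust"].any
        (fun keyword => PySem.Str.isIn keyword d)) := by
    rw [Bool.eq_iff_iff, PySem.Set.contains_iff, hF]; exact pv_found_real_estate d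
  have eALT : PySem.Set.contains F "alternative" =
      (["bitcoin", "crypto", "btc", "eth", "ethereum", "dogecoin", "cryptocurrency",
        "gold", "silver", "commodity", "precious metals", "hedge fund", "private equity"].any
        (fun keyword => PySem.Str.isIn keyword d)) := by
    rw [Bool.eq_iff_iff, PySem.Set.contains_iff, hF]; exact pv_found_alternative d
  have eCASH : PySem.Set.contains F "cash" =
      (["checking", "savings", "money market", "cd", "certificate of deposit",
        "cash", "offshore", "high yield savings"].any
        (fun keyword => PySem.Str.isIn keyword d)) := by
    rw [Bool.eq_iff_iff, PySem.Set.contains_iff, hF]; exact pv_found_cash d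
  have eNC : PySem.Set.contains F "no_cash" =
      (["mutual", "fund", "etf", "stock", "investment", "bond"].any
        (fun keyword => PySem.Str.isIn keyword d)) := by
    rw [Bool.eq_iff_iff, PySem.Set.contains_iff, hF]; exact pv_found_no_cash d
  have eBND : PySem.Set.contains F "bonds" =
      (["bond", "treasury", "fixed income", "government bond", "corporate bond",
        "municipal bond", "bond fund", "bnd", "agg", "fixed", "pacific life"].any
        (fun keyword => PySem.Str.isIn keyword d)) := by
    rw [Bool.eq_iff_iff, PySem.Set.contains_iff, hF]; exact pv_found_bonds d
  have eSTK : PySem.Set.contains F "stocks" =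
      (["stock", "equity", "etf", "mutual fund", "brokerage", "investment",
        "portfolio", "securities", "etrade", "robinhood", "vanguard", "fidelity",
        "spy", "voo", "qqq", "growth", "value", "international", "emerging",
        "index fund", "total stock"].any
        (fun keyword => PySem.Str.isIn keyword d)) := by
    rw [Bool.eq_iff_iff, PySem.Set.contains_iff, hF]; exact pv_found_stocks d
  have eRET : PySem.Set.contains F "retirement" =
      (["401k", "401(k)", "ira", "roth", "retirement", "pension", "sep",
        "403b", "tsp", "529", "hsa", "health savings"].any
        (fun keyword => PySem.Str.isIn keyword d)) := by
    rw [Bool.eq_iff_iff, PySem.Set.contains_iff, hF]; exact pv_found_retirement d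
  have eDis : ∀ t : String, t ≠ "cash" →
      PySem.Set.contains (PySem.Set.discard F "cash") t = PySem.Set.contains F t := by
    intro t ht
    rw [Bool.eq_iff_iff, PySem.Set.contains_iff, PySem.Set.contains_iff, PySem.Set.mem_discard]
    exact ⟨fun h => h.1, fun h => ⟨h, ht⟩⟩
  have eDisCash : PySem.Set.contains (PySem.Set.discard F "cash") "cash" = false := by
    simp [PySem.Set.mem_discard]
  rw [eNC]
  cases hNC : (["mutual", "fund", "etf", "stock", "investment", "bond"].any
      (fun keyword => PySem.Str.isIn keyword d)) with
  | true =>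
    simp only [if_true]
    rw [eDis "real_estate" (by decide), eDis "alternative" (by decide), eDisCash,
      eDis "bonds" (by decide), eDis "stocks" (by decide), eDis "retirement" (by decide),
      eRE, eALT, eBND, eSTK, eRET]
    cases h1 : (["home", "house", "property", "real estate", "residence", "rental",
        "mortgage", "reit", "real estate investment trust"].any
        (fun keyword => PySem.Str.isIn keyword d)) <;>
    cases h2 : (["bitcoin", "crypto", "btc", "eth", "ethereum", "dogecoin", "cryptocurrency",
        "gold", "silver", "commodity", "precious metals", "hedge fund", "private equity"].any
        (fun keyword => PySem.Str.isIn keyword d)) <;>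
    cases h3 : (["checking", "savings", "money market", "cd", "certificate of deposit",
        "cash", "offshore", "high yield savings"].any
        (fun keyword => PySem.Str.isIn keyword d)) <;>
    cases h5 : (["bond", "treasury", "fixed income", "government bond", "corporate bond",
        "municipal bond", "bond fund", "bnd", "agg", "fixed", "pacific life"].any
        (fun keyword => PySem.Str.isIn keyword d)) <;>
    cases h6 : (["stock", "equity", "etf", "mutual fund", "brokerage", "investment",
        "portfolio", "securities", "etrade", "robinhood", "vanguard", "fidelity",
        "spy", "voo", "qqq", "growth", "value", "international", "emerging",
        "index fund", "total stock"].any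
        (fun keyword => PySem.Str.isIn keyword d)) <;>
    cases h7 : (["401k", "401(k)", "ira", "roth", "retirement", "pension", "sep",
        "403b", "tsp", "529", "hsa", "health savings"].any
        (fun keyword => PySem.Str.isIn keyword d)) <;>
      simp
  | false =>
    simp only [if_false, Bool.false_eq_true]
    rw [eRE, eALT, eCASH, eBND, eSTK, eRET]
    cases h1 : (["home", "house", "property", "real estate", "residence", "rental",
        "mortgage", "reit", "real estate investment trust"].any
        (fun keyword => PySem.Str.isIn keyword d)) <;>
    cases h2 : (["bitcoin", "crypto", "btc", "eth", "ethereum", "dogecoin", "cryptocurrency",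
        "gold", "silver", "commodity", "precious metals", "hedge fund", "private equity"].any
        (fun keyword => PySem.Str.isIn keyword d)) <;>
    cases h3 : (["checking", "savings", "money market", "cd", "certificate of deposit",
        "cash", "offshore", "high yield savings"].any
        (fun keyword => PySem.Str.isIn keyword d)) <;>
    cases h5 : (["bond", "treasury", "fixed income", "government bond", "corporate bond",
        "municipal bond", "bond fund", "bnd", "agg", "fixed", "pacific life"].any
        (fun keyword => PySem.Str.isIn keyword d)) <;>
    cases h6 : (["stock", "equity", "etf", "mutual fund", "brokerage", "investment",
        "portfolio", "securities", "etrade", "robinhood", "vanguard", "fidelity",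
        "spy", "voo", "qqq", "growth", "value", "international", "emerging",
        "index fund", "total stock"].any
        (fun keyword => PySem.Str.isIn keyword d)) <;>
    cases h7 : (["401k", "401(k)", "ira", "roth", "retirement", "pension", "sep",
        "403b", "tsp", "529", "hsa", "health savings"].any
        (fun keyword => PySem.Str.isIn keyword d)) <;>
      simp
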